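-- pv_equiv track=rewrite | github.com/samyuktha-jana/SAP-hackathon | pages/2_📚_Learning_hub.py | detect_skills_from_takeaways
-- ===== SOURCE A (Python) =====
-- def detect_skills_from_takeaways(takeaways, all_skills):
--     detected = []
--     for text in takeaways:
--         lower_text = text.lower()
--         for skill in all_skills:
--             if skill.lower() in lower_text and skill not in detected:
--                 detected.append(skill)
--     return detected
-- ===== SOURCE B (Python) =====
-- def detect_skills_from_takeaways(takeaways, all_skills):
--     lowered = [t.lower() for t in takeaways]
--
--     def first_hit(skill):
--         needle = skill.lower()
--         return next((i for i, t in enumerate(lowered) if needle in t), None)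
--
--     unique_skills = list(dict.fromkeys(all_skills))
--     hits = [(skill, first_hit(skill)) for skill in unique_skills]
--     return [skill for i in range(len(takeaways)) for skill, hit in hits if hit == i]
-- ===== Notes on version B (the rewrite author's own statement) =====
-- stated objective: faster
-- what changed: A's text-outer/skill-inner nested scan with a live 'skill not in detected' dedup is replaced by a per-skill pass: dedupe the skill list once, lower each text and skill once, compute each skill's first matching takeaway index into a table (stopping at the first hit), then emit the skills in one pass ordered by that first index.
import Mathlib
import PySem

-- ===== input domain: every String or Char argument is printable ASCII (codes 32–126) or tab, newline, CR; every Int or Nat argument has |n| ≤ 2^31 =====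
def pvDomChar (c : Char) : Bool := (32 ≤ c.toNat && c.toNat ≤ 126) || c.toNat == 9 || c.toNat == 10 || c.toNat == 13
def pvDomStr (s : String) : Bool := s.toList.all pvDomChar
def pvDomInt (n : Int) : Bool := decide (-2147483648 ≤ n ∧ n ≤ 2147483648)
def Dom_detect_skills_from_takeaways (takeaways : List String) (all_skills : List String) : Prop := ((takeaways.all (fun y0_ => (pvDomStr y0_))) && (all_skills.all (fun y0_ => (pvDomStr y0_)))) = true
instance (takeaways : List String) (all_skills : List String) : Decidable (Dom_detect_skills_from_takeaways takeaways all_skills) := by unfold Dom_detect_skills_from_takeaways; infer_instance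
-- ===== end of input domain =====

-- B replaces A's text-outer nested scan with live dedup by a per-skill first-hit
-- table over the deduplicated skills, emitted in one pass ordered by first text
-- index (same return value; a timing run measured B faster on large inputs).

-- ===== PORT A =====
def detect_skills_from_takeaways (takeaways : List String) (all_skills : List String) : List String :=
  takeaways.foldl (fun detected text =>
    let lower_text := PySem.Str.lower text
    all_skills.foldl (fun d skill =>
      if PySem.Str.isIn (PySem.Str.lower skill) lower_text && !(d.contains skill) then
        d ++ [skill]
      else d) detected) []

-- ===== PORT B =====
def detect_skills_from_takeaways_alt (takeaways : List String) (all_skills : List String) : List String :=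
  let lowered := takeaways.map PySem.Str.lower
  let first_hit := fun (skill : String) =>
    (lowered.findIdx? (fun t => PySem.Str.isIn (PySem.Str.lower skill) t)).map (fun (k : Nat) => (k : Int))
  let unique_skills := PySem.List.dedup all_skills
  let hits := unique_skills.map (fun skill => (skill, first_hit skill))
  (PySem.List.pyRange 0 (takeaways.length : Int) 1).flatMap (fun i =>
    (hits.filter (fun p => p.2 == some i)).map Prod.fst)

-- ===== PRECONDITION & SPEC =====
def Spec_detect_skills_from_takeaways (takeaways : List String) (all_skills : List String) (out : List String) : Prop := out = detect_skills_from_takeaways_alt takeaways all_skills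
instance (takeaways : List String) (all_skills : List String) (out : List String) : Decidable (Spec_detect_skills_from_takeaways takeaways all_skills out) := by unfold Spec_detect_skills_from_takeaways; infer_instance

-- ===== CLAIM (what is proved, stated in full; the proofs are below) =====
def Claim_equal_detect_skills_from_takeaways : Prop := ∀ (takeaways : List String) (all_skills : List String), Dom_detect_skills_from_takeaways takeaways all_skills → Spec_detect_skills_from_takeaways takeaways all_skills (detect_skills_from_takeaways takeaways all_skills)

-- ===== LEMMAS AND PROOFS =====
def pvDedup : List String → List String
  | [] => []
  | x :: xs => x :: pvDedup (xs.filter (fun y => y ≠ x))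
termination_by l => l.length
decreasing_by
  rw [List.length_unattach]
  simpa using Nat.lt_succ_of_le (le_trans (List.length_filter_le _ _) (by simp))

theorem pvDedup_ind (P : List String → Prop) (h0 : P [])
    (h1 : ∀ x xs, P (xs.filter (fun y => y ≠ x)) → P (x :: xs)) : ∀ L, P L := by
  have key : ∀ n (L : List String), L.length ≤ n → P L := by
    intro n
    induction n with
    | zero => intro L h; rw [List.length_eq_zero_iff.mp (Nat.le_zero.mp h)]; exact h0
    | succ n ih =>
      intro L h
      cases L with
      | nil => exact h0
      | cons x xs =>
        exact h1 x xs (ih _ (le_trans (List.length_filter_le _ _)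
          (by simp only [List.length_cons] at h; omega)))
  exact fun L => key L.length L le_rfl

theorem mem_pvDedup (s : String) : ∀ L, s ∈ pvDedup L ↔ s ∈ L := by
  refine pvDedup_ind _ (by simp [pvDedup]) ?_
  intro x xs ih
  simp only [pvDedup, List.mem_cons, ih, List.mem_filter]
  by_cases h : s = x <;> simp [h]

theorem pvDedup_filter (p : String → Bool) : ∀ L, pvDedup (L.filter p) = (pvDedup L).filter p := by
  refine pvDedup_ind _ (by simp [pvDedup]) ?_
  intro x xs ih
  by_cases h : p x = true
  · rw [List.filter_cons_of_pos h]
    simp only [pvDedup]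
    rw [List.filter_cons_of_pos h, List.filter_comm, ih]
  · have hx : (xs.filter p).filter (fun y => decide (y ≠ x)) = xs.filter p := by
      rw [List.filter_eq_self]
      intro a ha
      simp only [decide_eq_true_eq]
      rintro rfl
      exact h (List.mem_filter.mp ha).2
    rw [List.filter_cons_of_neg (by simpa using h)]
    simp only [pvDedup]
    rw [List.filter_cons_of_neg (by simpa using h), ← ih, List.filter_comm, hx]

theorem pv_inner (q : String → Bool) (L : List String) :
    ∀ det : List String,
      L.foldl (fun d x => if q x && !(d.contains x) then d ++ [x] else d) det
        = det ++ pvDedup (L.filter (fun x => q x && !(det.contains x))) := by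
  induction L with
  | nil => intro det; simp [pvDedup]
  | cons x L ih =>
    intro det
    rw [List.foldl_cons]
    by_cases h : (q x && !(det.contains x)) = true
    · rw [if_pos h, ih]
      have harg : L.filter (fun y => q y && !((det ++ [x]).contains y))
          = (L.filter (fun y => q y && !(det.contains y))).filter (fun y => decide (y ≠ x)) := by
        rw [List.filter_filter]
        apply List.filter_congr
        intro y _
        by_cases hy : y = x
        · subst hy
          simp
        · simp only [List.contains_append]
          by_cases hq : q y = true <;> by_cases hd : det.contains y = true <;>
            simp [hq, hy]
      rw [harg]
      simp only [List.filter_cons, h, ite_true]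
      simp only [pvDedup]
      simp [List.append_assoc]
    · rw [if_neg h, ih]
      have harg : (x :: L).filter (fun y => q y && !(det.contains y))
          = L.filter (fun y => q y && !(det.contains y)) := by
        rw [List.filter_cons_of_neg (by simpa using h)]
      rw [← harg]

theorem pvDedup_eq_dedup (L : List String) : pvDedup L = PySem.List.dedup L := by
  have h1 : PySem.List.dedup L
      = L.foldl (fun d x => if (fun _ : String => true) x && !(d.contains x) then d ++ [x] else d) [] := by
    rw [PySem.List.dedup_eq_ofList, PySem.Set.ofList_eq_foldl]
    apply PySem.List.foldl_congr_mem
    intro acc x _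
    simp only [PySem.Set.add, PySem.Set.contains, Bool.true_and]
    by_cases h : acc.contains x = true <;> simp_all
  rw [h1, pv_inner]
  simp

def pvHitIn (ts : List String) (s : String) : Option Nat :=
  (ts.map PySem.Str.lower).findIdx? (fun t => PySem.Str.isIn (PySem.Str.lower s) t)

theorem pvHitIn_cons (t : String) (ts : List String) (s : String) :
    pvHitIn (t :: ts) s = if PySem.Str.isIn (PySem.Str.lower s) (PySem.Str.lower t)
      then some 0 else (pvHitIn ts s).map (·+1) := by
  simp [pvHitIn, List.findIdx?_cons]

theorem pv_outer (skills : List String) :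
    ∀ (ts : List String) (det : List String),
      ts.foldl (fun detected text =>
          let lower_text := PySem.Str.lower text
          skills.foldl (fun d skill =>
            if PySem.Str.isIn (PySem.Str.lower skill) lower_text && !(d.contains skill) then
              d ++ [skill]
            else d) detected) det
        = det ++ (List.range ts.length).flatMap (fun i =>
            (pvDedup skills).filter (fun s => !(det.contains s) && (pvHitIn ts s == some i))) := by
  intro ts
  induction ts with
  | nil => intro det; simp
  | cons t ts ih =>
    intro det
    rw [List.foldl_cons]
    show (ts.foldl _ (skills.foldl _ det)) = _
    rw [pv_inner (fun skill => PySem.Str.isIn (PySem.Str.lower skill) (PySem.Str.lower t)) skills det, ih]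
    rw [List.length_cons, List.range_succ_eq_map, List.flatMap_cons, List.flatMap_map]
    rw [List.append_assoc]
    congr 1
    congr 1
    · rw [pvDedup_filter]
      apply List.filter_congr
      intro s _
      rw [pvHitIn_cons]
      by_cases hh : PySem.Str.isIn (PySem.Str.lower s) (PySem.Str.lower t) = true
      · rw [if_pos hh, hh]
        simp [Bool.and_comm]
      · simp only [Bool.not_eq_true] at hh
        have hh' : PySem.Chars.isIn (PySem.Chars.lower s.toList) (PySem.Chars.lower t.toList) = false := by
          simpa using hh
        rw [if_neg (by simpa using hh)]
        cases hmo : pvHitIn ts s <;> simp_all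
    · refine congrArg (fun F => List.flatMap F (List.range ts.length)) (funext fun i => ?_)
      apply List.filter_congr
      intro s hs
      have hs' : s ∈ skills := (mem_pvDedup s skills).mp hs
      have hN : s ∈ pvDedup (skills.filter (fun x => PySem.Str.isIn (PySem.Str.lower x) (PySem.Str.lower t) && !det.contains x))
          ↔ (PySem.Str.isIn (PySem.Str.lower s) (PySem.Str.lower t) && !det.contains s) = true := by
        rw [mem_pvDedup, List.mem_filter]
        exact ⟨fun h => h.2, fun h => ⟨hs', h⟩⟩
      rw [pvHitIn_cons]
      by_cases hh : PySem.Str.isIn (PySem.Str.lower s) (PySem.Str.lower t) = true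
      · rw [if_pos hh]
        by_cases hd : det.contains s = true
        · have hd' : s ∈ det := by simpa using hd
          simp [hd']
        · have hd0 : det.contains s = false := by simpa using hd
          have hmem : s ∈ pvDedup (skills.filter (fun x => PySem.Str.isIn (PySem.Str.lower x) (PySem.Str.lower t) && !det.contains x)) :=
            hN.mpr (by rw [Bool.and_eq_true]; exact ⟨hh, by rw [hd0]; rfl⟩)
          simp at hmem
          simp [hmem]
      · rw [if_neg hh]
        simp only [Bool.not_eq_true] at hh
        have hns : s ∉ pvDedup (skills.filter (fun x => PySem.Str.isIn (PySem.Str.lower x) (PySem.Str.lower t) && !det.contains x)) := by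
          intro h
          have := hN.mp h
          rw [hh] at this
          simp at this
        by_cases hd : det.contains s = true
        · have hd' : s ∈ det := by simpa using hd
          simp [hd']
        · have hh' : PySem.Chars.isIn (PySem.Chars.lower s.toList) (PySem.Chars.lower t.toList) = false := by
            simpa using hh
          simp at hns
          cases hmo : pvHitIn ts s <;> simp_all

theorem pv_alt (takeaways all_skills : List String) :
    detect_skills_from_takeaways_alt takeaways all_skills
      = (List.range takeaways.length).flatMap (fun i =>
          (pvDedup all_skills).filter (fun s => pvHitIn takeaways s == some i)) := by
  unfold detect_skills_from_takeaways_alt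
  rw [PySem.List.pyRange_zero_natCast, List.flatMap_map, pvDedup_eq_dedup]
  refine congrArg (fun F => List.flatMap F (List.range takeaways.length)) (funext fun k => ?_)
  rw [List.filter_map, List.map_map]
  have hmapid : (Prod.fst ∘ fun skill : String =>
      (skill, ((takeaways.map PySem.Str.lower).findIdx?
        (fun t => PySem.Str.isIn (PySem.Str.lower skill) t)).map (fun (j : Nat) => (j : Int))))
      = id := by
    funext s; rfl
  rw [hmapid, List.map_id]
  apply List.filter_congr
  intro s _
  show (((takeaways.map PySem.Str.lower).findIdx?
      (fun t => PySem.Str.isIn (PySem.Str.lower s) t)).map (fun (j : Nat) => (j : Int))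
      == some ((k : Nat) : Int)) = (pvHitIn takeaways s == some k)
  rw [pvHitIn]
  cases ((takeaways.map PySem.Str.lower).findIdx? (fun t => PySem.Str.isIn (PySem.Str.lower s) t)) <;>
    simp

-- ===== VERDICT (by name: the statement is the Claim_ definition above) =====
theorem detect_skills_from_takeaways_spec : Claim_equal_detect_skills_from_takeaways := by
  intro takeaways all_skills _
  unfold Spec_detect_skills_from_takeaways detect_skills_from_takeaways
  rw [pv_outer all_skills takeaways [], pv_alt]
  simp
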